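-- pv_equiv track=rewrite | github.com/pankajganjale2805/ai-agent | src/new-agent.py | update_path_for_dynamic_routes
-- ===== SOURCE A (Python) =====
-- def update_path_for_dynamic_routes(directory: str) -> str:
--   # Remove query parameters if present
--   if '?' in directory:
--     directory = directory.split('?')[0]
--
--   directory = directory.split('/')
--   updated_directory = []
--   for d in directory:
--     if d.startswith(':'):
--       updated_directory.append(f'[{d[1:]}]')
--     else:
--       updated_directory.append(d)
--   return "/".join(updated_directory)
-- ===== SOURCE B (Python) =====
-- def update_path_for_dynamic_routes(directory: str) -> str:
--   # Single left-to-right scan: stop at the query marker, rewrite dynamic segments in brackets on the fly.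
--   out = []
--   seg_start = True
--   in_param = False
--   for ch in directory:
--     if ch == '?':
--       break
--     if ch == '/':
--       if in_param:
--         out.append(']')
--         in_param = False
--       out.append('/')
--       seg_start = True
--     elif seg_start and ch == ':':
--       out.append('[')
--       in_param = True
--       seg_start = False
--     else:
--       out.append(ch)
--       seg_start = False
--   if in_param:
--     out.append(']')
--   return "".join(out)
-- ===== Notes on version B (the rewrite author's own statement) =====
-- stated objective: alternative
-- what changed: Replaced A's tokenize-map-join pipeline (strip the query string, split the path into segments, rewrite each, join back) with a single character-level state-machine scan that rewrites dynamic segments in place and stops at the query string.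
import Mathlib
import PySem

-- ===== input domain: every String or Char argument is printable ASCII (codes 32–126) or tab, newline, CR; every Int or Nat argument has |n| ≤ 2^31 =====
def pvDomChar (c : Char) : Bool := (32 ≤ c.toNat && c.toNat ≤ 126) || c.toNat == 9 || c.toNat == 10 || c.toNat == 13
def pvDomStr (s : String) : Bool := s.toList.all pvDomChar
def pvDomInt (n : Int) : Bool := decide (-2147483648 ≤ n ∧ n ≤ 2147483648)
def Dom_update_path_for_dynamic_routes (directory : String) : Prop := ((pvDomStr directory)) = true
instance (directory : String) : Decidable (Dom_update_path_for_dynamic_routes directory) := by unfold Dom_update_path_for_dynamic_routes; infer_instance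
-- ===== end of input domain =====

-- B replaces A's tokenize-map-join pipeline by one character-level state-machine scan of the
-- path; same O(n) cost, genuinely different traversal (objective: alternative).

-- ===== PORT A =====
def update_path_for_dynamic_routes (directory : String) : String :=
  let cs := directory.toList
  -- if '?' in directory: directory = directory.split('?')[0]
  let cs1 := if PySem.Chars.isIn ['?'] cs = true
             then PySem.List.pyGetD (PySem.Chars.splitOn cs ['?']) 0 []
             else cs
  -- directory = directory.split('/')
  let parts := PySem.Chars.splitOn cs1 ['/']
  -- for d in directory: append '[' + d[1:] + ']' if d.startswith(':') else d
  let updated := parts.foldl (fun acc d =>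
      if PySem.Chars.startswith d [':'] = true
      then acc ++ ['[' :: (PySem.Chars.slice d (some 1) none ++ [']'])]
      else acc ++ [d]) ([] : List (List Char))
  -- return "/".join(updated_directory)
  String.ofList (PySem.Chars.join ['/'] updated)

-- ===== PORT B =====
-- single scan over the characters; stops at the query marker; segStart/inParam state machine (Source B's loop)
def pvScanB : List Char → Bool → Bool → List Char
  | [], _, inP => if inP then [']'] else []
  | c :: cs, segStart, inP =>
    if c = '?' then (if inP then [']'] else [])
    else if c = '/' then (if inP then [']'] else []) ++ '/' :: pvScanB cs true false
    else if segStart && decide (c = ':') then '[' :: pvScanB cs false true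
    else c :: pvScanB cs false inP

def update_path_for_dynamic_routes_alt (directory : String) : String :=
  String.ofList (pvScanB directory.toList true false)

-- ===== PRECONDITION & SPEC =====
def Spec_update_path_for_dynamic_routes (directory : String) (out : String) : Prop := out = update_path_for_dynamic_routes_alt directory
instance (directory : String) (out : String) : Decidable (Spec_update_path_for_dynamic_routes directory out) := by unfold Spec_update_path_for_dynamic_routes; infer_instance

-- ===== CLAIM (what is proved, stated in full; the proofs are below) =====
def Claim_equal_update_path_for_dynamic_routes : Prop := ∀ (directory : String), Dom_update_path_for_dynamic_routes directory → Spec_update_path_for_dynamic_routes directory (update_path_for_dynamic_routes directory)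

-- ===== LEMMAS AND PROOFS =====

-- the per-segment rewrite A applies inside its loop
def pvF (d : List Char) : List Char :=
  if PySem.Chars.startswith d [':'] = true
  then '[' :: (PySem.Chars.slice d (some 1) none ++ [']'])
  else d

theorem pvF_nil : pvF [] = [] := by decide

theorem pvF_cons (c : Char) (t : List Char) :
    pvF (c :: t) = if c = ':' then '[' :: (t ++ [']']) else c :: t := by
  unfold pvF
  by_cases h : c = ':'
  · subst h
    rw [if_pos (by simp [PySem.Chars.startswith, List.isPrefixOf]), if_pos rfl]
    rw [show PySem.Chars.slice (':'::t) (some 1) none = PySem.List.slice (':'::t) (some 1) none from rfl,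
      PySem.List.slice_from (':'::t) (a := 1) (by omega)]
    rfl
  · rw [if_neg (by simp [PySem.Chars.startswith, List.isPrefixOf]; exact fun he => h he.symm), if_neg h]

-- reference form of splitting on a single character
def pvSimple (s : Char) : List Char → List Char → List (List Char)
  | [], cur => [cur.reverse]
  | c :: rest, cur => if c = s then cur.reverse :: pvSimple s rest [] else pvSimple s rest (c :: cur)

theorem pv_go_spec (s : Char) : ∀ (l : List Char) (fuel : Nat) (cur : List Char) (acc : List (List Char)), l.length < fuel →
    PySem.Chars.splitOn.go [s] fuel l cur acc = acc.reverse ++ pvSimple s l cur := by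
  intro l
  induction l with
  | nil =>
    intro fuel cur acc h
    match fuel, h with
    | fuel+1, _ => simp [PySem.Chars.splitOn.go.eq_def, pvSimple]
  | cons c rest ih =>
    intro fuel cur acc h
    match fuel, h with
    | fuel+1, h =>
      rw [PySem.Chars.splitOn.go.eq_def]
      by_cases hc : c = s
      · simp [List.isPrefixOf, hc, pvSimple, ih fuel [] _ (by simpa using h)]
      · simp [List.isPrefixOf, hc, Ne.symm hc, pvSimple, ih fuel (c::cur) _ (by simpa using h)]

theorem pv_split_eq (s : Char) (l : List Char) : PySem.Chars.splitOn l [s] = pvSimple s l [] := by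
  simpa [PySem.Chars.splitOn] using pv_go_spec s l (l.length+1) [] [] (by omega)

theorem pv_simple_head (s : Char) : ∀ (cs cur : List Char),
    pvSimple s cs cur = (cur.reverse ++ cs.takeWhile (· ≠ s)) ::
      (match cs.dropWhile (· ≠ s) with | [] => [] | _ :: r => pvSimple s r []) := by
  intro cs
  induction cs with
  | nil => intro cur; simp [pvSimple]
  | cons c rest ih =>
    intro cur
    by_cases hc : c = s
    · simp [pvSimple, hc]
    · rw [pvSimple]
      simp only [if_neg hc, ih (c :: cur), List.takeWhile_cons, List.dropWhile_cons]
      simp [hc]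

-- B's scan from a mid-segment state
theorem pv_scan_mid : ∀ (cs : List Char) (b : Bool), '?' ∉ cs →
    pvScanB cs false b = cs.takeWhile (· ≠ '/') ++ (if b then [']'] else []) ++
      (match cs.dropWhile (· ≠ '/') with | [] => [] | _ :: r => '/' :: pvScanB r true false) := by
  intro cs
  induction cs with
  | nil => intro b _; simp [pvScanB]
  | cons c rest ih =>
    intro b hq
    have hcq : c ≠ '?' := fun h => hq (h ▸ List.mem_cons_self)
    have hq' : '?' ∉ rest := fun h => hq (List.mem_cons_of_mem _ h)
    by_cases hc : c = '/'
    · simp [pvScanB, hc]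
    · rw [pvScanB]
      simp only [if_neg hcq, if_neg hc, Bool.false_and, if_neg (by simp : ¬ (false = true))]
      simp [hc, ih b hq']

-- B ignores everything from the first '?' on
theorem pv_scan_take : ∀ (cs : List Char) (st b : Bool),
    pvScanB cs st b = pvScanB (cs.takeWhile (· ≠ '?')) st b := by
  intro cs
  induction cs with
  | nil => intro st b; simp
  | cons c rest ih =>
    intro st b
    by_cases hc : c = '?'
    · simp [pvScanB, hc]
    · rw [List.takeWhile_cons, if_pos (by simp [hc])]
      simp only [ne_eq, decide_not] at ih
      cases st <;> by_cases h1 : c = '/' <;> by_cases h2 : c = ':' <;>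
        simp [pvScanB, hc, h1, h2, ← ih]

-- main: B's scan computes A's split-map-join, on '?'-free input
theorem pv_scan_main : ∀ (n : Nat) (cs : List Char), cs.length ≤ n → '?' ∉ cs →
    pvScanB cs true false = PySem.Chars.join ['/'] ((pvSimple '/' cs []).map pvF) := by
  intro n
  induction n with
  | zero =>
    intro cs h _
    have : cs = [] := List.length_eq_zero_iff.1 (Nat.le_zero.1 h)
    subst this
    simp [pvScanB, pvSimple, pvF, PySem.Chars.startswith]
  | succ n ih =>
    intro cs hlen hq
    match cs with
    | [] => simp [pvScanB, pvSimple, pvF, PySem.Chars.startswith]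
    | c :: rest =>
      have hcq : c ≠ '?' := fun h => hq (h ▸ List.mem_cons_self)
      have hq' : '?' ∉ rest := fun h => hq (List.mem_cons_of_mem _ h)
      have hlen' : rest.length ≤ n := by simpa using hlen
      by_cases hc : c = '/'
      · -- empty first segment
        rw [pvScanB]
        simp only [if_neg hcq, if_pos hc]
        rw [pvSimple, if_pos hc]
        rw [pv_simple_head '/' rest [], List.map_cons, List.map_cons, PySem.Chars.join_cons_cons,
          ← List.map_cons, ← pv_simple_head '/' rest [], ih rest hlen' hq']
        simp [pvF_nil]
      · -- first segment starts with c
        have hsuf : ∀ d r, rest.dropWhile (· ≠ '/') = d :: r → ('?' ∉ r ∧ r.length ≤ n) := by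
          intro d r h
          have hs : d :: r <:+ rest := h ▸ List.dropWhile_suffix _
          constructor
          · intro hm
            exact hq' (hs.subset (List.mem_cons_of_mem _ hm))
          · have := hs.length_le
            simp at this
            omega
        rw [pvScanB]
        simp only [if_neg hcq, if_neg hc, Bool.true_and]
        rw [pvSimple, if_neg hc, pv_simple_head '/' rest [c]]
        by_cases hcolon : c = ':'
        · simp only [if_pos (by simp [hcolon] : (decide (c = ':')) = true)]
          rw [pv_scan_mid rest true hq']
          cases hdw : rest.dropWhile (· ≠ '/') with
          | nil =>
            simp [pvF_cons, hcolon]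
          | cons d r =>
            obtain ⟨hqr, hlr⟩ := hsuf d r hdw
            simp only [hdw]
            rw [pv_simple_head '/' r [], List.map_cons, List.map_cons, PySem.Chars.join_cons_cons,
              ← List.map_cons, ← pv_simple_head '/' r [], ih r hlr hqr]
            simp [pvF_cons, hcolon]
        · simp only [if_neg (by simp [hcolon] : ¬ ((decide (c = ':')) = true))]
          rw [pv_scan_mid rest false hq']
          cases hdw : rest.dropWhile (· ≠ '/') with
          | nil =>
            simp [pvF_cons, hcolon]
          | cons d r =>
            obtain ⟨hqr, hlr⟩ := hsuf d r hdw
            simp only [hdw]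
            rw [pv_simple_head '/' r [], List.map_cons, List.map_cons, PySem.Chars.join_cons_cons,
              ← List.map_cons, ← pv_simple_head '/' r [], ih r hlr hqr]
            simp [pvF_cons, hcolon]

-- the query-strip step of A yields exactly the '?'-free prefix
theorem pv_strip_eq (cs : List Char) :
    (if PySem.Chars.isIn ['?'] cs = true
     then PySem.List.pyGetD (PySem.Chars.splitOn cs ['?']) 0 []
     else cs) = cs.takeWhile (· ≠ '?') := by
  by_cases h : PySem.Chars.isIn ['?'] cs = true
  · rw [if_pos h, pv_split_eq, pv_simple_head '?' cs [], PySem.List.pyGetD_zero]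
    simp
  · rw [if_neg h]
    have hq : '?' ∉ cs := fun hm =>
      h ((PySem.Chars.isIn_iff_infix _ _).2 ((List.singleton_infix_iff '?' cs).2 hm))
    symm
    exact List.takeWhile_eq_self_iff.mpr (fun x hx => by simp; intro he; exact absurd (he ▸ hx) hq)

theorem pv_no_q (cs : List Char) : '?' ∉ cs.takeWhile (· ≠ '?') := by
  intro hm
  have := List.mem_takeWhile_imp hm
  simp at this

-- ===== VERDICT (by name: the statement is the Claim_ definition above) =====
theorem update_path_for_dynamic_routes_spec : Claim_equal_update_path_for_dynamic_routes := by
  intro directory _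
  unfold Spec_update_path_for_dynamic_routes update_path_for_dynamic_routes update_path_for_dynamic_routes_alt
  dsimp only
  rw [pv_strip_eq]
  rw [pv_scan_take directory.toList true false]
  rw [pv_scan_main (directory.toList.takeWhile (· ≠ '?')).length _ le_rfl (pv_no_q _)]
  rw [pv_split_eq]
  congr 1
  rw [show (fun (acc : List (List Char)) (d : List Char) =>
        if PySem.Chars.startswith d [':'] = true
        then acc ++ ['[' :: (PySem.Chars.slice d (some 1) none ++ [']'])]
        else acc ++ [d]) = fun acc d => acc ++ [pvF d] from by
      funext acc d; unfold pvF; split <;> rfl]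
  rw [PySem.List.foldl_append_singleton_eq_map pvF _ []]
  simp
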